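-- pv_equiv track=rewrite | github.com/lagomosker/Manning-LiveProject-Python-Algorithms | Schedule.py | permute_chunks
-- ===== SOURCE A (Python) =====
-- def permute_chunks(chunks):
--     output=[]
--     if len(chunks)==1:
--         return chunks
--     else:
--         for index, chunk in enumerate(chunks):
--             for permutation in permute_chunks(chunks[:index] + chunks[index+1:]):
--                 output+=list([chunk+permutation])
--     return output
-- ===== SOURCE B (Python) =====
-- import itertools
--
-- def permute_chunks(chunks):
--     if not chunks:
--         return []
--     return [''.join(p) for p in itertools.permutations(chunks)]
-- ===== Notes on version B (the rewrite author's own statement) =====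
-- stated objective: idiomatic
-- what changed: Replaces A's hand-rolled recursion that builds concatenated strings via list slicing and nested accumulation loops with itertools.permutations plus a join over each permutation tuple, which yields the orderings in the same fix-first order.
import Mathlib
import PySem

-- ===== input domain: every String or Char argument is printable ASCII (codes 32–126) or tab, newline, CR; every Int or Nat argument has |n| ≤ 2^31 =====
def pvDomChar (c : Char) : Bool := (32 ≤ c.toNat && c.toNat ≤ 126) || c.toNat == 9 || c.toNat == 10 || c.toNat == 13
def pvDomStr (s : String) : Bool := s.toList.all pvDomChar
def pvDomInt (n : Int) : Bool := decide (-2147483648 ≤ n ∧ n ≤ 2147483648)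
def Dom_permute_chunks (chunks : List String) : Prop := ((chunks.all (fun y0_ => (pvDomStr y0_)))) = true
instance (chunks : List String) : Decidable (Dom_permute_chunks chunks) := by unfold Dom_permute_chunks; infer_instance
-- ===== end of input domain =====

-- B replaces A's slice-and-recurse string building by itertools.permutations + join (idiomatic, no speed claim).

-- ===== PORT A =====
-- literal transliteration of A: recursion with chunks[:i] + chunks[i+1:], nested accumulation loops
def permute_chunks (chunks : List String) : List String :=
  if chunks.length == 1 then chunks
  else
    (PySem.List.enumerate chunks).attach.foldl
      (fun output p =>
        (permute_chunks (PySem.List.slice chunks none (some p.1.1) ++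
                         PySem.List.slice chunks (some (p.1.1 + 1)) none)).foldl
          (fun out permutation => out ++ [p.1.2 ++ permutation]) output)
      []
termination_by chunks.length
decreasing_by
  obtain ⟨⟨i, c⟩, hmem⟩ := p
  rw [PySem.List.mem_enumerate_iff] at hmem
  obtain ⟨k, hk, hpk⟩ := hmem
  simp only [Prod.mk.injEq] at hpk
  obtain ⟨h1, -⟩ := hpk
  simp only
  have h1' : i = (k : Int) := by omega
  subst h1'
  have : ((k : Int) + 1) = ((k + 1 : Nat) : Int) := by push_cast; ring
  rw [this, PySem.List.slice_to_natCast, PySem.List.slice_from_natCast]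
  simp [List.length_take, List.length_drop]
  omega

-- ===== PORT B =====
-- ''.join(p)
def pvJoin : List String → String
  | [] => ""
  | s :: rest => s ++ pvJoin rest

-- itertools.permutations(xs): all orderings in fix-first (lexicographic-by-index) order
def pyPermutations (xs : List String) : List (List String) :=
  if xs.isEmpty then [[]]
  else
    (List.range xs.length).attach.flatMap
      (fun i => (pyPermutations (xs.eraseIdx i.1)).map (fun p => xs.getD i.1 "" :: p))
termination_by xs.length
decreasing_by
  obtain ⟨i, hmem⟩ := i
  rw [List.mem_range] at hmem
  simp only
  rw [List.length_eraseIdx]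
  simp [hmem]
  omega

def permute_chunks_alt (chunks : List String) : List String :=
  if chunks.isEmpty then []
  else (pyPermutations chunks).map pvJoin

-- ===== PRECONDITION & SPEC =====
def Spec_permute_chunks (chunks : List String) (out : List String) : Prop := out = permute_chunks_alt chunks
instance (chunks : List String) (out : List String) : Decidable (Spec_permute_chunks chunks out) := by unfold Spec_permute_chunks; infer_instance

-- ===== CLAIM (what is proved, stated in full; the proofs are below) =====
def Claim_equal_permute_chunks : Prop := ∀ (chunks : List String), Dom_permute_chunks chunks → Spec_permute_chunks chunks (permute_chunks chunks)

-- ===== LEMMAS AND PROOFS =====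

theorem pv_flatMap_attach {α β : Type} (l : List α) (g : α → List β) :
    l.attach.flatMap (fun i => g i.1) = l.flatMap g := by
  conv_lhs => rw [show l.attach.flatMap (fun i => g i.1) = (l.attach.map Subtype.val).flatMap g
    from (List.flatMap_map _ _ _).symm]
  rw [List.attach_map_subtype_val]

-- main invariant: away from the empty list, A computes the joined permutations in the same order
theorem permute_chunks_eq_join_perms :
    ∀ (n : Nat) (xs : List String), xs.length = n → xs ≠ [] →
      permute_chunks xs = (pyPermutations xs).map pvJoin := by
  intro n
  induction n using Nat.strong_induction_on with
  | _ n ih =>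
    intro xs hlen hne
    rw [permute_chunks, pyPermutations]
    have hnot : xs.isEmpty = false := by simpa using hne
    rw [hnot]
    by_cases h1 : xs.length = 1
    · -- singleton: A returns xs itself; B joins the single permutation
      obtain ⟨c, hc⟩ : ∃ c, xs = [c] := by
        match xs, h1 with
        | [c], _ => exact ⟨c, rfl⟩
      subst hc
      rw [if_pos (by rfl)]
      rw [pv_flatMap_attach (List.range ([c] : List String).length)
            (fun k => (pyPermutations (([c] : List String).eraseIdx k)).map
              (fun p => ([c] : List String).getD k "" :: p))]
      rw [show (List.range ([c] : List String).length) = [0] from rfl]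
      simp only [Bool.false_eq_true, if_false, List.flatMap_cons, List.flatMap_nil,
        List.append_nil]
      rw [show ([c] : List String).eraseIdx 0 = [] from rfl]
      rw [show pyPermutations [] = [[]] from by rw [pyPermutations]; rfl]
      simp [pvJoin]
    · rw [if_neg (show ¬((xs.length == 1) = true) by simpa using h1)]
      -- inner loop: output ++ one string per permutation
      have hinner : ∀ (c : String) (l acc : List String),
          l.foldl (fun out permutation => out ++ [c ++ permutation]) acc
            = acc ++ l.map (fun p => c ++ p) :=
        fun c l acc => PySem.List.foldl_append_singleton_eq_map (fun p => c ++ p) l acc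
      calc (PySem.List.enumerate xs).attach.foldl
              (fun output p =>
                (permute_chunks (PySem.List.slice xs none (some p.1.1) ++
                                 PySem.List.slice xs (some (p.1.1 + 1)) none)).foldl
                  (fun out permutation => out ++ [p.1.2 ++ permutation]) output) []
          = (PySem.List.enumerate xs).foldl
              (fun output q =>
                output ++ (permute_chunks (PySem.List.slice xs none (some q.1) ++
                                 PySem.List.slice xs (some (q.1 + 1)) none)).map
                  (fun p => q.2 ++ p)) [] := by
              rw [List.foldl_attach (l := PySem.List.enumerate xs)
                    (f := fun output q =>
                      List.foldl (fun out permutation => out ++ [q.2 ++ permutation]) output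
                        (permute_chunks (PySem.List.slice xs none (some q.1) ++
                          PySem.List.slice xs (some (q.1 + 1)) none))) (b := [])]
              exact List.foldl_ext _ _ [] (fun acc q _ => by rw [hinner])
        _ = (PySem.List.enumerate xs).flatMap
              (fun q => (permute_chunks (PySem.List.slice xs none (some q.1) ++
                                 PySem.List.slice xs (some (q.1 + 1)) none)).map
                  (fun p => q.2 ++ p)) := by
              rw [PySem.List.foldl_append_eq_flatMap]; simp
        _ = (List.range xs.length).flatMap
              (fun k => (pyPermutations (xs.eraseIdx k)).map (fun p => xs.getD k "" ++ pvJoin p)) := by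
              rw [PySem.List.enumerate_eq_map_pyRange xs ""]
              rw [show PySem.List.len xs = ((xs.length : Nat) : Int) from rfl]
              rw [PySem.List.pyRange_zero_natCast, List.flatMap_map, List.flatMap_map]
              refine List.flatMap_congr (fun k hk => ?_)
              rw [List.mem_range] at hk
              have hk' : k < xs.length := by omega
              have hcast : ((k : Int) + 1) = ((k + 1 : Nat) : Int) := by push_cast; ring
              rw [hcast, PySem.List.slice_to_natCast, PySem.List.slice_from_natCast,
                  ← List.eraseIdx_eq_take_drop_succ]
              have hne' : xs.eraseIdx k ≠ [] := by
                have := List.length_eraseIdx (l := xs) (i := k)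
                intro hE; rw [hE] at this; simp [hk'] at this; omega
              rw [ih (xs.eraseIdx k).length
                    (by rw [List.length_eraseIdx]; simp [hk']; omega)
                    (xs.eraseIdx k) rfl hne']
              rw [List.map_map]
              simp [PySem.List.pyGetD_natCast, Function.comp]
        _ = ((List.range xs.length).attach.flatMap
              (fun i => (pyPermutations (xs.eraseIdx i.1)).map (fun p => xs.getD i.1 "" :: p))).map pvJoin := by
              rw [List.map_flatMap,
                  show (List.range xs.length).attach.flatMap
                      (fun i => ((pyPermutations (xs.eraseIdx i.1)).map (fun p => xs.getD i.1 "" :: p)).map pvJoin)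
                    = ((List.range xs.length).attach.map Subtype.val).flatMap
                      (fun k => ((pyPermutations (xs.eraseIdx k)).map (fun p => xs.getD k "" :: p)).map pvJoin)
                    from by rw [List.flatMap_map],
                  List.attach_map_subtype_val]
              refine List.flatMap_congr (fun k _ => ?_)
              rw [List.map_map]
              rfl

-- ===== VERDICT (by name: the statement is the Claim_ definition above) =====
theorem permute_chunks_spec : Claim_equal_permute_chunks := by
  intro chunks _
  unfold Spec_permute_chunks permute_chunks_alt
  by_cases h : chunks = []
  · subst h; rw [permute_chunks]; simp [List.attach, List.attachWith, PySem.List.enumerate]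
  · have := permute_chunks_eq_join_perms chunks.length chunks rfl h
    rw [this]
    simp [show chunks.isEmpty = false by simpa using h]
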